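-- pv_equiv track=rewrite | github.com/JuanHoyos00/Practica_de_EDD | src/Recursión/Ej_Letras_repetidas.py | letras_repetidas
-- ===== SOURCE A (Python) =====
-- def letras_repetidas(palabra: str, i: int = 0, lista: set[str] = None, repetidas: list[str]  = None):
--     if lista == None:
--         lista = set()
--     if repetidas == None:
--         repetidas = []
--     if i == len(palabra):
--         if repetidas:
--             return f"EL ÚLTIMO CARACTER EN REPETIRSE FUE: {repetidas[-1]}"
--         else:
--             return "NO HAY LETRAS QUE SE REPITEN."
--
--     letra = palabra[i]
--     if letra in lista:
--         if letra not in repetidas: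
--             repetidas.append(letra)
--     else:
--         lista.add(letra)
--
--     return letras_repetidas(palabra, i+1, lista, repetidas )
-- ===== SOURCE B (Python) =====
-- def letras_repetidas(palabra: str, i: int = 0, lista: set = None, repetidas: list = None):
--     if lista is None:
--         lista = set()
--     if repetidas is None:
--         repetidas = []
--     for idx in range(i, len(palabra)):
--         letra = palabra[idx]
--         if letra in lista:
--             if letra not in repetidas:
--                 repetidas.append(letra)
--         else:
--             lista.add(letra)
--     if repetidas:
--         return f"EL ÚLTIMO CARACTER EN REPETIRSE FUE: {repetidas[-1]}"
--     else:
--         return "NO HAY LETRAS QUE SE REPITEN."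
-- ===== Notes on version B (the rewrite author's own statement) =====
-- stated objective: idiomatic
-- what changed: Replaced the tail recursion (one Python stack frame per character, RecursionError on long strings) by a single for-loop over range(i, len(palabra)) with the same set/list state.
import Mathlib
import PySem

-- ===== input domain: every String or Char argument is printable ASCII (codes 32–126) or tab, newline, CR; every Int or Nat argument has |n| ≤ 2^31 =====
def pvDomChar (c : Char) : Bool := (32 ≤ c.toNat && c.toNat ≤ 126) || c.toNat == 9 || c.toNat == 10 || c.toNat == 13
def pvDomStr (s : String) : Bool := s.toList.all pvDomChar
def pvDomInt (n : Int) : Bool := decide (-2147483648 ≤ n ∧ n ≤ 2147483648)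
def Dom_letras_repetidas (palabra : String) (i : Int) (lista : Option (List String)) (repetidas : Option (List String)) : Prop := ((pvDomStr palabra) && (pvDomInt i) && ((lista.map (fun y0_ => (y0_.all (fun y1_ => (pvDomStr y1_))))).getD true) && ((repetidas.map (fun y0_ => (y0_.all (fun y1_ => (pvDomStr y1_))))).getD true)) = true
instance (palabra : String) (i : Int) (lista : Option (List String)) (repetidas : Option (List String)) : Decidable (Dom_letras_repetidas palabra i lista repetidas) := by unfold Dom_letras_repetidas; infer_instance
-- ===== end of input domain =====

-- B replaces A's one-frame-per-character tail recursion by a single loop over range(i, len(palabra))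
-- with the same set/list state (idiomatic). Both A and B mutate the
-- caller-supplied `lista`/`repetidas` in place identically; the equivalence proved is about the return value.

-- ===== PORT A =====
-- the tail recursion of A, on the already-initialised set/list (A re-checks `== None` on every
-- level, but after the first level both are always non-None, so the init happens once, in the wrapper)
def letras_repetidasRec (chars : List Char) (i : Int) (lista : PySem.Set String) (repetidas : List String) : String :=
  if i = (chars.length : Int) then
    if repetidas ≠ [] then
      "EL ÚLTIMO CARACTER EN REPETIRSE FUE: " ++ PySem.List.pyGetD repetidas (-1) ""
    else "NO HAY LETRAS QUE SE REPITEN."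
  else
    match h : PySem.List.pyGet? chars i with
    | none => ""   -- Python raises IndexError here (outside Pre_)
    | some c =>
      let letra : String := String.mk [c]
      if lista.contains letra then
        if ¬ (letra ∈ repetidas) then
          letras_repetidasRec chars (i+1) lista (repetidas ++ [letra])
        else
          letras_repetidasRec chars (i+1) lista repetidas
      else
        letras_repetidasRec chars (i+1) (lista.add letra) repetidas
termination_by ((chars.length : Int) + 1 - i).toNat
decreasing_by
  all_goals
    have hin : ¬ PySem.List.pyGet? chars i = none := by simp [h]
    rw [PySem.List.pyGet?_eq_none_iff, not_not] at hin
    unfold PySem.Raise.InRange at hin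
    omega

def letras_repetidas (palabra : String) (i : Int) (lista : Option (List String)) (repetidas : Option (List String)) : String :=
  letras_repetidasRec palabra.toList i (lista.getD PySem.Set.empty) (repetidas.getD [])

-- ===== PORT B =====
-- one step of B's for-loop body
def letrasStep (chars : List Char) (st : PySem.Set String × List String) (idx : Int) : PySem.Set String × List String :=
  let letra : String := String.mk [PySem.List.pyGetD chars idx ' ']   -- index always in range inside Pre_
  if st.1.contains letra then
    if ¬ (letra ∈ st.2) then (st.1, st.2 ++ [letra]) else st
  else (st.1.add letra, st.2)

def letras_repetidas_alt (palabra : String) (i : Int) (lista : Option (List String)) (repetidas : Option (List String)) : String :=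
  let chars := palabra.toList
  let st := (PySem.List.pyRange i (chars.length : Int) 1).foldl (letrasStep chars)
              (lista.getD PySem.Set.empty, repetidas.getD [])
  if st.2 ≠ [] then
    "EL ÚLTIMO CARACTER EN REPETIRSE FUE: " ++ PySem.List.pyGetD st.2 (-1) ""
  else "NO HAY LETRAS QUE SE REPITEN."

-- ===== PRECONDITION & SPEC =====
-- Pre_ excludes exactly the inputs where Python A raises IndexError: i > len (immediate, since
-- A indexes palabra[i] before recursing) or i < -len (negative index out of range).
def Pre_letras_repetidas (palabra : String) (i : Int) (lista : Option (List String)) (repetidas : Option (List String)) : Prop :=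
  -(palabra.toList.length : Int) ≤ i ∧ i ≤ (palabra.toList.length : Int)
instance (palabra : String) (i : Int) (lista : Option (List String)) (repetidas : Option (List String)) : Decidable (Pre_letras_repetidas palabra i lista repetidas) := by unfold Pre_letras_repetidas; infer_instance

def pvWitness_letras_repetidas : String × Int × Option (List String) × Option (List String) :=
  ("abcabc", 0, none, none)

def Spec_letras_repetidas (palabra : String) (i : Int) (lista : Option (List String)) (repetidas : Option (List String)) (out : String) : Prop := out = letras_repetidas_alt palabra i lista repetidas
instance (palabra : String) (i : Int) (lista : Option (List String)) (repetidas : Option (List String)) (out : String) : Decidable (Spec_letras_repetidas palabra i lista repetidas out) := by unfold Spec_letras_repetidas; infer_instance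

-- ===== CLAIM (what is proved, stated in full; the proofs are below) =====
def Claim_equal_letras_repetidas : Prop := ∀ (palabra : String) (i : Int) (lista : Option (List String)) (repetidas : Option (List String)), Dom_letras_repetidas palabra i lista repetidas → Pre_letras_repetidas palabra i lista repetidas → Spec_letras_repetidas palabra i lista repetidas (letras_repetidas palabra i lista repetidas)


-- ===== LEMMAS AND PROOFS =====

-- the recursion of A computes the fold of B, for any in-range start index and any state
theorem rec_eq_fold (chars : List Char) :
    ∀ (n : Nat) (i : Int) (lista : PySem.Set String) (repetidas : List String),
      -(chars.length : Int) ≤ i → i ≤ (chars.length : Int) →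
      ((chars.length : Int) - i).toNat = n →
      letras_repetidasRec chars i lista repetidas =
        (if ((PySem.List.pyRange i (chars.length : Int) 1).foldl (letrasStep chars) (lista, repetidas)).2 ≠ [] then
          "EL ÚLTIMO CARACTER EN REPETIRSE FUE: " ++
            PySem.List.pyGetD ((PySem.List.pyRange i (chars.length : Int) 1).foldl (letrasStep chars) (lista, repetidas)).2 (-1) ""
        else "NO HAY LETRAS QUE SE REPITEN.") := by
  intro n
  induction n with
  | zero =>
    intro i lista repetidas hlo hhi hn
    have hi : i = (chars.length : Int) := by omega
    subst hi
    rw [PySem.List.pyRange_one_eq_nil (by omega)]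
    rw [letras_repetidasRec]
    simp
  | succ n ih =>
    intro i lista repetidas hlo hhi hn
    have hlt : i < (chars.length : Int) := by omega
    have hin : PySem.Raise.InRange chars.length i := by
      unfold PySem.Raise.InRange; omega
    have hsome : PySem.List.pyGet? chars i = some (PySem.List.pyGetD chars i ' ') := by
      cases h : PySem.List.pyGet? chars i with
      | none =>
        rw [PySem.List.pyGet?_eq_none_iff] at h; exact absurd hin h
      | some c =>
        simp [PySem.List.pyGetD, h]
    rw [letras_repetidasRec]
    rw [if_neg (by omega), hsome]
    rw [PySem.List.pyRange_one_cons hlt, List.foldl_cons]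
    simp only []
    by_cases h1 : lista.contains (String.mk [PySem.List.pyGetD chars i ' ']) = true
    · by_cases h2 : (String.mk [PySem.List.pyGetD chars i ' ']) ∈ repetidas
      · rw [if_pos h1, if_neg (not_not_intro h2)]
        have h1' : String.mk [PySem.List.pyGetD chars i ' '] ∈ lista := by simpa using h1
        have hstep : letrasStep chars (lista, repetidas) i = (lista, repetidas) := by
          simp [letrasStep, h1', h2]
        rw [hstep]
        exact ih (i+1) lista repetidas (by omega) (by omega) (by omega)
      · rw [if_pos h1, if_pos h2]
        have hstep : letrasStep chars (lista, repetidas) i =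
            (lista, repetidas ++ [String.mk [PySem.List.pyGetD chars i ' ']]) := by
          have h1' : String.mk [PySem.List.pyGetD chars i ' '] ∈ lista := by simpa using h1
          simp [letrasStep, h1', h2]
        rw [hstep]
        exact ih (i+1) lista (repetidas ++ [String.mk [PySem.List.pyGetD chars i ' ']])
          (by omega) (by omega) (by omega)
    · rw [if_neg h1]
      have hstep : letrasStep chars (lista, repetidas) i =
          (lista.add (String.mk [PySem.List.pyGetD chars i ' ']), repetidas) := by
        have h1' : String.mk [PySem.List.pyGetD chars i ' '] ∉ lista := by simpa using h1
        simp [letrasStep, h1']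
      rw [hstep]
      exact ih (i+1) (lista.add (String.mk [PySem.List.pyGetD chars i ' '])) repetidas
        (by omega) (by omega) (by omega)

-- ===== VERDICT (by name: the statement is the Claim_ definition above) =====
theorem letras_repetidas_spec : Claim_equal_letras_repetidas := by
  intro palabra i lista repetidas _ hpre
  unfold Spec_letras_repetidas letras_repetidas letras_repetidas_alt
  exact rec_eq_fold palabra.toList (((palabra.toList.length : Int) - i).toNat) i
    (lista.getD PySem.Set.empty) (repetidas.getD []) hpre.1 hpre.2 rfl
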